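-- pv_equiv track=rewrite | github.com/ezhilmaran1612/days | day06.py | countXOR
-- ===== SOURCE A (Python) =====
-- def countXOR(n):
--
--     count0, count1 = 0, 0
--     while (n != 0):
--
--         # calculating count of zeros and ones
--         if(n % 2 == 0):
--             count0 += 1
--         else:
--             count1 += 1
--         n //= 2
--
--     return (count0 ^ count1)
-- ===== SOURCE B (Python) =====
-- def countXOR(n):
--     # Table-driven radix-4 scan: consume two bits per step via a precomputed
--     # (zeros, ones) table for full 2-bit chunks, and a separate table for the
--     # leading chunk (whose leading zero bit is not counted).
--     CHUNK = ((2, 0), (1, 1), (1, 1), (0, 2))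
--     TOP = ((0, 0), (0, 1), (1, 1), (0, 2))
--     zeros, ones = 0, 0
--     while n >= 4:
--         z, o = CHUNK[n % 4]
--         zeros += z
--         ones += o
--         n //= 4
--     z, o = TOP[n]
--     return (zeros + z) ^ (ones + o)
-- ===== Notes on version B (the rewrite author's own statement) =====
-- stated objective: alternative
-- what changed: Replaces A's per-bit halving loop with a table-driven radix-4 scan: each step consumes two bits at once, adding precomputed (zeros, ones) contributions of the 2-bit chunk, with a separate table for the leading chunk so leading zeros are not counted.
import Mathlib
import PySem

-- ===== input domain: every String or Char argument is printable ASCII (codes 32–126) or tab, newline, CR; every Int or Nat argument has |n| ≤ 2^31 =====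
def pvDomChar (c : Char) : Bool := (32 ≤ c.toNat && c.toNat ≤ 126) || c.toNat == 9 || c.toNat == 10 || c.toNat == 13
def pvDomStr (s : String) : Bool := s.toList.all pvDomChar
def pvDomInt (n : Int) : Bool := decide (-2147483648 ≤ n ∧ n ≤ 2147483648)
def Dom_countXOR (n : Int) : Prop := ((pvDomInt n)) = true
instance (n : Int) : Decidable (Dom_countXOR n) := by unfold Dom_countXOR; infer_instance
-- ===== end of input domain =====

-- B replaces A's per-bit halving loop by a table-driven radix-4 scan (two bits per step,
-- precomputed chunk tables, separate table for the leading chunk); alternative, same cost.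

-- ===== PORT A =====
-- A's while-loop; the `n ≤ 0` guard returns at n = 0 exactly as Python does
-- (for n < 0 Python never terminates — those inputs are outside Pre_countXOR).
def countXORLoop (n count0 count1 : Int) : Int :=
  if n ≤ 0 then PySem.Int.bxor count0 count1
  else if PySem.Int.mod n 2 = 0 then
    countXORLoop (PySem.Int.floordiv n 2) (count0 + 1) count1
  else
    countXORLoop (PySem.Int.floordiv n 2) count0 (count1 + 1)
termination_by n.toNat
decreasing_by
  all_goals
    rename_i h _
    rw [PySem.Int.floordiv_eq_ediv_of_pos (by omega : (0:Int) < 2)]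
    omega

def countXOR (n : Int) : Int := countXORLoop n 0 0

-- ===== PORT B =====
-- the (zeros, ones) tables of Source B, indexed Python-style (pyGet?; in-range in the loop)
def pvChunkTbl : List (Int × Int) := [(2, 0), (1, 1), (1, 1), (0, 2)]
def pvTopTbl : List (Int × Int) := [(0, 0), (0, 1), (1, 1), (0, 2)]

def countXORAltLoop (n zeros ones : Int) : Int :=
  if 4 ≤ n then
    let zo := (PySem.List.pyGet? pvChunkTbl (PySem.Int.mod n 4)).getD (0, 0)
    countXORAltLoop (PySem.Int.floordiv n 4) (zeros + zo.1) (ones + zo.2)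
  else
    let zo := (PySem.List.pyGet? pvTopTbl n).getD (0, 0)
    PySem.Int.bxor (zeros + zo.1) (ones + zo.2)
termination_by n.toNat
decreasing_by
  rename_i h
  rw [PySem.Int.floordiv_eq_ediv_of_pos (by omega : (0:Int) < 4)]
  omega

def countXOR_alt (n : Int) : Int := countXORAltLoop n 0 0

-- ===== PRECONDITION & SPEC =====
-- Pre_ excludes negative n, on which Python A never terminates (n //= 2 stalls at -1).
def Pre_countXOR (n : Int) : Prop := 0 ≤ n
instance (n : Int) : Decidable (Pre_countXOR n) := by unfold Pre_countXOR; infer_instance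
def pvWitness_countXOR : Int := (5)

def Spec_countXOR (n : Int) (out : Int) : Prop := out = countXOR_alt n
instance (n : Int) (out : Int) : Decidable (Spec_countXOR n out) := by unfold Spec_countXOR; infer_instance

-- ===== CLAIM (what is proved, stated in full; the proofs are below) =====
def Claim_equal_countXOR : Prop := ∀ (n : Int), Dom_countXOR n → Pre_countXOR n → Spec_countXOR n (countXOR n)

-- ===== LEMMAS AND PROOFS =====

-- A's loop computes bxor of (zero-bit count) and (one-bit count) up to the MSB.
theorem countXORLoop_eq (m : Nat) : ∀ (c0 c1 : Nat),
    countXORLoop (m : Int) (c0 : Int) (c1 : Int)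
      = PySem.Int.bxor ((c0 + (PySem.Int.bitLength (m : Int) - PySem.Int.bitCount (m : Int)) : Nat) : Int)
                       ((c1 + PySem.Int.bitCount (m : Int) : Nat) : Int) := by
  induction m using Nat.strong_induction_on with
  | _ m ih =>
    intro c0 c1
    by_cases hm : m = 0
    · subst hm
      rw [countXORLoop]
      simp [PySem.Int.bitLength_zero, PySem.Int.bitCount_zero]
    · have hpos : (0:Int) < (m : Int) := by exact_mod_cast Nat.pos_of_ne_zero hm
      rw [countXORLoop]
      have hmod : PySem.Int.mod (m : Int) 2 = ((m % 2 : Nat) : Int) := by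
        rw [PySem.Int.mod_eq_emod_of_pos (by omega : (0:Int) < 2)]
        omega
      have hdiv : PySem.Int.floordiv (m : Int) 2 = ((m / 2 : Nat) : Int) := by
        rw [PySem.Int.floordiv_eq_ediv_of_pos (by omega : (0:Int) < 2)]
        omega
      have hlt : m / 2 < m := Nat.div_lt_self (Nat.pos_of_ne_zero hm) (by omega)
      have hBL := PySem.Int.bitLength_natCast (Nat.pos_of_ne_zero hm)
      have hBC := PySem.Int.bitCount_natCast (Nat.pos_of_ne_zero hm)
      have hle := PySem.Int.bitCount_le_bitLength ((m / 2 : Nat) : Int)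
      rw [if_neg (by omega), hmod, hdiv]
      rcases Nat.mod_two_eq_zero_or_one m with h2 | h2
      · rw [if_pos (by exact_mod_cast congrArg (Nat.cast : Nat → Int) h2)]
        have : (↑c0 + 1 : Int) = ((c0 + 1 : Nat) : Int) := by push_cast; ring
        rw [this, ih (m / 2) hlt (c0 + 1) c1]
        congr 2 <;> omega
      · rw [if_neg (by rw [h2]; simp)]
        have : (↑c1 + 1 : Int) = ((c1 + 1 : Nat) : Int) := by push_cast; ring
        rw [this, ih (m / 2) hlt c0 (c1 + 1)]
        congr 2 <;> omega

-- B's radix-4 loop computes the same bxor of zero- and one-bit counts.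
theorem countXORAltLoop_eq (m : Nat) : ∀ (z o : Nat),
    countXORAltLoop (m : Int) (z : Int) (o : Int)
      = PySem.Int.bxor ((z + (PySem.Int.bitLength (m : Int) - PySem.Int.bitCount (m : Int)) : Nat) : Int)
                       ((o + PySem.Int.bitCount (m : Int) : Nat) : Int) := by
  induction m using Nat.strong_induction_on with
  | _ m ih =>
    intro z o
    by_cases hm : 4 ≤ m
    · -- a full 2-bit chunk: peel two halvings from bitLength/bitCount
      have hq : m / 4 < m := Nat.div_lt_self (by omega) (by omega)
      have hmod : PySem.Int.mod (m : Int) 4 = ((m % 4 : Nat) : Int) := by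
        rw [PySem.Int.mod_eq_emod_of_pos (by omega : (0:Int) < 4)]
        omega
      have hdiv : PySem.Int.floordiv (m : Int) 4 = ((m / 4 : Nat) : Int) := by
        rw [PySem.Int.floordiv_eq_ediv_of_pos (by omega : (0:Int) < 4)]
        omega
      have hBC : PySem.Int.bitCount (m : Int)
          = (m % 4 % 2 + m % 4 / 2) + PySem.Int.bitCount ((m / 4 : Nat) : Int) := by
        have h4 : m / 2 / 2 = m / 4 := by omega
        rw [PySem.Int.bitCount_natCast (by omega : 0 < m),
            PySem.Int.bitCount_natCast (by omega : 0 < m / 2), h4]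
        have h1 : m % 2 = m % 4 % 2 := by omega
        have h2 : m / 2 % 2 = m % 4 / 2 := by omega
        omega
      have hBL : PySem.Int.bitLength (m : Int)
          = PySem.Int.bitLength ((m / 4 : Nat) : Int) + 2 := by
        have h4 : m / 2 / 2 = m / 4 := by omega
        rw [PySem.Int.bitLength_natCast (by omega : 0 < m),
            PySem.Int.bitLength_natCast (by omega : 0 < m / 2), h4]
      have hle := PySem.Int.bitCount_le_bitLength ((m / 4 : Nat) : Int)
      have hget : (PySem.List.pyGet? pvChunkTbl ((m % 4 : Nat) : Int)).getD (0, 0)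
          = (((2 - (m % 4 % 2 + m % 4 / 2) : Nat) : Int), ((m % 4 % 2 + m % 4 / 2 : Nat) : Int)) := by
        have hd : m % 4 = 0 ∨ m % 4 = 1 ∨ m % 4 = 2 ∨ m % 4 = 3 := by omega
        rcases hd with h | h | h | h <;> rw [h] <;> decide
      rw [countXORAltLoop, if_pos (by exact_mod_cast hm : (4:Int) ≤ (m : Int))]
      simp only [hmod, hdiv, hget]
      rw [← Nat.cast_add, ← Nat.cast_add, ih (m / 4) hq (z + (2 - (m % 4 % 2 + m % 4 / 2))) (o + (m % 4 % 2 + m % 4 / 2))]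
      congr 2 <;> omega
    · -- the leading chunk: m < 4, read the TOP table
      have hget : (PySem.List.pyGet? pvTopTbl (m : Int)).getD (0, 0)
          = (((PySem.Int.bitLength (m : Int) - PySem.Int.bitCount (m : Int) : Nat) : Int),
             ((PySem.Int.bitCount (m : Int) : Nat) : Int)) := by
        have hd : m = 0 ∨ m = 1 ∨ m = 2 ∨ m = 3 := by omega
        rcases hd with h | h | h | h <;> subst h <;> decide
      rw [countXORAltLoop, if_neg (by exact_mod_cast hm : ¬ (4:Int) ≤ (m : Int))]
      simp only [hget]
      congr 1

-- ===== VERDICT (by name: the statement is the Claim_ definition above) =====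
theorem countXOR_spec : Claim_equal_countXOR := by
  intro n _ hpre
  obtain ⟨m, rfl⟩ : ∃ m : Nat, n = (m : Int) := ⟨n.toNat, (Int.toNat_of_nonneg hpre).symm⟩
  show countXOR (m : Int) = countXOR_alt (m : Int)
  have hA := countXORLoop_eq m 0 0
  have hB := countXORAltLoop_eq m 0 0
  simp only [Nat.zero_add, Nat.cast_zero] at hA hB
  simp [countXOR, countXOR_alt, hA, hB]
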